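-- pv_equiv track=rewrite | github.com/RagePly/aoc20 | day18.py | rec_evaluate
-- ===== SOURCE A (Python) =====
-- def rec_evaluate(expression):
--     left = None
--     op = ""
--     i = 0
--     while i < len(expression):
--         token = expression[i]
--         value = None
--         if token == "(":
--             i2 = findMatchingPar(expression[i:])
--             value = rec_evaluate(expression[i+1:i+i2])
--             i += i2 # The +1 will be added in end
--         elif token.isnumeric():
--             value = int(token)
--         else:
--             op = token
--
--         if left == None:
--             # This was the first round, operation is never the first token
--             left = value
--         elif not value == None: # The operation must have been set
--             if op == "+":
--                 left = left + value
--             else: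
--                 left = left * value
--             op = ""
--
--         i += 1
--
--     return left
--
-- def findMatchingPar(subtokens):
--     """The subtoken starts with the opening parenthasis and contains the remainder
--     of the math expression"""
--     count = 0
--     for i in range(len(subtokens)):
--         c = subtokens[i]
--         if c == "(":
--             count += 1
--         elif c == ")":
--             count -= 1
--
--         if count == 0:
--             return i
-- ===== SOURCE B (Python) =====
-- def rec_evaluate(expression):
--     """Single-pass stack evaluator: push context on '(', pop and combine on ')'."""
--     stack = []
--     left = None
--     op = ""
--     for token in expression:
--         if token == "(":
--             stack.append((left, op))
--             left = None
--             op = ""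
--         elif token == ")":
--             value = left
--             left, op = stack.pop()
--             left, op = _combine(left, op, value)
--         elif token.isnumeric():
--             left, op = _combine(left, op, int(token))
--         else:
--             op = token
--     return left
--
-- def _combine(left, op, value):
--     if left is None:
--         return value, op
--     if value is not None:
--         return (left + value if op == "+" else left * value), ""
--     return left, op
-- ===== Notes on version B (the rewrite author's own statement) =====
-- stated objective: faster
-- what changed: Replaced A's recursive evaluator, which rescans the suffix with findMatchingPar and re-slices the token list at every '(', by a single left-to-right pass that pushes the pending (left, op) context on '(' and pops it on ')'.
-- outside the precondition, e.g. on rec_evaluate(['1', ')', '2']): A returns 2, B raises IndexError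
import Mathlib
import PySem

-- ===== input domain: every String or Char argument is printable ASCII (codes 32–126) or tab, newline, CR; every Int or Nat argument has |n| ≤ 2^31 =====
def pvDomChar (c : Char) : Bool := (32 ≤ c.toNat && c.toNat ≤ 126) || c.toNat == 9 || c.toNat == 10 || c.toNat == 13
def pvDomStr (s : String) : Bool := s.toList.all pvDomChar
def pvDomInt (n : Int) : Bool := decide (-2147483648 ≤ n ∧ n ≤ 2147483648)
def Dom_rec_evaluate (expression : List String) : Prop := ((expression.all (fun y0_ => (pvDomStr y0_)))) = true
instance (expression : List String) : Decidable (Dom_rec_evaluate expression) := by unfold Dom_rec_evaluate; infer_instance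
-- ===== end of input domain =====

-- B replaces A's recursive evaluator (which rescans the suffix with findMatchingPar and re-slices
-- the list at every '(') by a single pass with an explicit stack of (left, op) contexts: faster.

-- ===== PORT A =====
-- the shared three-way update 'if left == None: … elif not value == None: …' (A writes it inline,
-- B's Python has it as the helper _combine; the code is identical)
def pvCombine (left : Option Int) (op : String) (value : Option Int) : Option Int × String :=
  match left with
  | none => (value, op)
  | some a =>
    match value with
    | some v => (some (if op = "+" then a + v else a * v), "")
    | none => (some a, op)

-- 'for i in range(len(subtokens)): …' of findMatchingPar, carrying the running index i
def fmpGo (l : List String) (count : Int) (i : Nat) : Option Nat :=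
  match l with
  | [] => none                    -- loop ends without return: Python returns None
  | c :: rest =>
    let count' := if c = "(" then count + 1 else if c = ")" then count - 1 else count
    if count' = 0 then some i else fmpGo rest count' (i + 1)

def findMatchingPar (subtokens : List String) : Option Nat := fmpGo subtokens 0 0

-- A's while-loop over expression[i:] as recursion on the suffix; slices expression[i+1:i+i2] and
-- the jump i += i2 + 1 become rest.take (i2-1) and rest.drop i2 of the current suffix.
def recA (l : List String) (left : Option Int) (op : String) : Option Int :=
  match l with
  | [] => left
  | token :: rest =>
    if token = "(" then
      match findMatchingPar (token :: rest) with
      | none => none              -- Python raises TypeError (i + None) here; excluded by Pre_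
      | some i2 =>
        let value := recA (rest.take (i2 - 1)) none ""
        let p := pvCombine left op value
        recA (rest.drop i2) p.1 p.2
    else if PySem.Str.strIsdigit token then
      -- token.isnumeric() = token.isdigit() on the printable-ASCII domain; int(token) always
      -- succeeds on a digit string, so ofStr? is some and getD 0 is exact
      let p := pvCombine left op (some ((PySem.Int.ofStr? token).getD 0))
      recA rest p.1 p.2
    else
      recA rest left token
termination_by l.length
decreasing_by all_goals (simp [List.length_take, List.length_drop]; try omega)

def rec_evaluate (expression : List String) : Option Int := recA expression none ""

-- ===== PORT B =====
-- single pass; the stack holds the suspended (left, op) contexts of open parentheses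
def altGo (l : List String) (stack : List (Option Int × String)) (left : Option Int) (op : String) :
    Option Int :=
  match l with
  | [] => left
  | token :: rest =>
    if token = "(" then
      altGo rest ((left, op) :: stack) none ""
    else if token = ")" then
      match stack with
      | [] => none                -- Python raises IndexError (pop from empty list); excluded by Pre_
      | c :: s =>
        let p := pvCombine c.1 c.2 left
        altGo rest s p.1 p.2
    else if PySem.Str.strIsdigit token then
      let p := pvCombine left op (some ((PySem.Int.ofStr? token).getD 0))
      altGo rest stack p.1 p.2
    else
      altGo rest stack left token

def rec_evaluate_alt (expression : List String) : Option Int := altGo expression [] none ""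

-- ===== PRECONDITION & SPEC =====
def pvDelta (t : String) : Int := if t = "(" then 1 else if t = ")" then -1 else 0

-- running parenthesis count from c stays ≥ 0 and ends at 0
def pvBalGo (l : List String) (c : Int) : Bool :=
  match l with
  | [] => decide (c = 0)
  | t :: r => decide (0 ≤ c + pvDelta t) && pvBalGo r (c + pvDelta t)

-- Pre_ excludes expressions with unbalanced parentheses: on an unmatched '(' A raises TypeError,
-- and on a stray ')' (count dips below 0) A happens to return a value — it treats the ')' as an
-- operator token — while B's own stack pop raises IndexError there.
def Pre_rec_evaluate (expression : List String) : Prop := pvBalGo expression 0 = true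
instance (expression : List String) : Decidable (Pre_rec_evaluate expression) := by
  unfold Pre_rec_evaluate; infer_instance

def pvWitness_rec_evaluate : List String := ["2", "+", "(", "3", "*", "4", ")"]

def Spec_rec_evaluate (expression : List String) (out : Option Int) : Prop :=
  out = rec_evaluate_alt expression
instance (expression : List String) (out : Option Int) : Decidable (Spec_rec_evaluate expression out) := by
  unfold Spec_rec_evaluate; infer_instance

-- ===== CLAIM (what is proved, stated in full; the proofs are below) =====
def Claim_equal_rec_evaluate : Prop :=
  ∀ (expression : List String), Dom_rec_evaluate expression → Pre_rec_evaluate expression →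
    Spec_rec_evaluate expression (rec_evaluate expression)

-- ===== LEMMAS AND PROOFS =====

-- A's loop state as a pair: identical recursion to recA, but also returning the final op
def pvStA (l : List String) (left : Option Int) (op : String) : Option Int × String :=
  match l with
  | [] => (left, op)
  | token :: rest =>
    if token = "(" then
      match findMatchingPar (token :: rest) with
      | none => (none, op)
      | some i2 =>
        let value := recA (rest.take (i2 - 1)) none ""
        let p := pvCombine left op value
        pvStA (rest.drop i2) p.1 p.2
    else if PySem.Str.strIsdigit token then
      let p := pvCombine left op (some ((PySem.Int.ofStr? token).getD 0))
      pvStA rest p.1 p.2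
    else
      pvStA rest left token
termination_by l.length
decreasing_by all_goals (simp [List.length_drop]; try omega)

theorem recA_eq_stA (l : List String) (left : Option Int) (op : String) :
    recA l left op = (pvStA l left op).1 := by
  fun_induction pvStA l left op
  case case1 => simp [recA]
  case case2 => rename_i hm; simp [recA, hm]
  case case3 =>
    rename_i i2 hm ih
    rw [recA]; simp only [hm]; exact ih
  case case4 =>
    rename_i h1 h2 p ih
    rw [recA]; simp only [if_neg h1, if_pos h2]; exact ih
  case case5 =>
    rename_i h1 h2 ih
    rw [recA]; simp only [if_neg h1, if_neg h2]; exact ih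

-- running count from c stays > 0 throughout l
def pvPosGo (l : List String) (c : Int) : Bool :=
  match l with
  | [] => true
  | t :: r => decide (0 < c + pvDelta t) && pvPosGo r (c + pvDelta t)

def pvCnt (l : List String) : Int :=
  match l with
  | [] => 0
  | t :: r => pvDelta t + pvCnt r

theorem count_step (t : String) (c : Int) :
    (if t = "(" then c + 1 else if t = ")" then c - 1 else c) = c + pvDelta t := by
  unfold pvDelta; split_ifs <;> ring

-- a balanced continuation from count c ≥ 1 splits at the first return to 0, which is a ')'
theorem bal_decomp (rest : List String) (c : Int) (hc : 1 ≤ c) (h : pvBalGo rest c = true) :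
    ∃ inner after, rest = inner ++ ")" :: after ∧ pvPosGo inner c = true ∧
      c + pvCnt inner = 1 ∧ pvBalGo after 0 = true := by
  induction rest generalizing c with
  | nil => simp [pvBalGo] at h; omega
  | cons t r ih =>
    simp only [pvBalGo, Bool.and_eq_true, decide_eq_true_eq] at h
    obtain ⟨hge, hr⟩ := h
    by_cases h0 : c + pvDelta t = 0
    · -- first return to 0: t must be ')' and c = 1
      have ht : t = ")" := by
        unfold pvDelta at h0; split_ifs at h0 <;> omega
      refine ⟨[], r, by simp [ht], by simp [pvPosGo], ?_, ?_⟩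
      · have : pvDelta t = -1 := by simp [pvDelta, ht]
        simp [pvCnt]; omega
      · rwa [h0] at hr
    · obtain ⟨inner, after, hsplit, hpos, hcnt, hafter⟩ := ih (c + pvDelta t) (by omega) hr
      refine ⟨t :: inner, after, by simp [hsplit], ?_, ?_, hafter⟩
      · simp only [pvPosGo, Bool.and_eq_true, decide_eq_true_eq]
        exact ⟨by omega, hpos⟩
      · simp [pvCnt]; omega

-- findMatchingPar's loop walks through a positive inner segment and stops at the closing ')'
theorem fmp_of_pos (inner : List String) (c : Int) (i : Nat) (after : List String)
    (hpos : pvPosGo inner c = true) (hcnt : c + pvCnt inner = 1) :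
    fmpGo (inner ++ ")" :: after) c i = some (i + inner.length) := by
  induction inner generalizing c i with
  | nil =>
    simp [pvCnt] at hcnt
    simp [fmpGo, hcnt]
  | cons t r ih =>
    simp only [pvPosGo, Bool.and_eq_true, decide_eq_true_eq] at hpos
    obtain ⟨hgt, hr⟩ := hpos
    simp only [pvCnt] at hcnt
    rw [List.cons_append, fmpGo]
    simp only [count_step]
    rw [if_neg (by omega)]
    have := ih (c + pvDelta t) (i + 1) hr (by omega)
    rw [this]; simp; omega
-- a positive segment ending at net count 1 is balanced from c - 1
theorem bal_of_pos (inner : List String) (c : Int) (hpos : pvPosGo inner c = true)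
    (hcnt : c + pvCnt inner = 1) : pvBalGo inner (c - 1) = true := by
  induction inner generalizing c with
  | nil => simp [pvCnt] at hcnt; simp [pvBalGo]; omega
  | cons t r ih =>
    simp only [pvPosGo, Bool.and_eq_true, decide_eq_true_eq] at hpos
    obtain ⟨hgt, hr⟩ := hpos
    simp only [pvCnt] at hcnt
    simp only [pvBalGo, Bool.and_eq_true, decide_eq_true_eq]
    constructor
    · omega
    · have : c - 1 + pvDelta t = (c + pvDelta t) - 1 := by ring
      rw [this]; exact ih (c + pvDelta t) hr (by omega)

-- MAIN: over a balanced segment, B's stack pass computes exactly A's loop state and returns to the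
-- same stack, continuing with the rest of the input
theorem altGo_balanced (n : Nat) :
    ∀ (l : List String), l.length ≤ n → pvBalGo l 0 = true →
    ∀ (l2 : List String) (s : List (Option Int × String)) (left : Option Int) (op : String),
      altGo (l ++ l2) s left op = altGo l2 s (pvStA l left op).1 (pvStA l left op).2 := by
  induction n with
  | zero =>
    intro l hlen _ l2 s left op
    have : l = [] := List.length_eq_zero_iff.mp (by omega)
    subst this; simp [pvStA]
  | succ n ih =>
    intro l hlen hbal l2 s left op
    match l with
    | [] => simp [pvStA]
    | token :: rest =>
      by_cases htok : token = "("
      · subst htok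
        simp only [pvBalGo, Bool.and_eq_true, decide_eq_true_eq] at hbal
        obtain ⟨-, hrest⟩ := hbal
        have hd1 : (0 : Int) + pvDelta "(" = 1 := by decide
        rw [hd1] at hrest
        obtain ⟨inner, after, hsplit, hpos, hcnt, hafter⟩ := bal_decomp rest 1 (by omega) hrest
        -- findMatchingPar finds the close at index inner.length + 1
        have hfmp : findMatchingPar ("(" :: rest) = some (1 + inner.length) := by
          rw [findMatchingPar, fmpGo]
          simp only [show (0 : Int) + 1 = 1 from rfl]
          rw [hsplit]
          exact fmp_of_pos inner 1 1 after hpos hcnt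
        have hlen_inner : inner.length ≤ n := by
          subst hsplit; simp at hlen ⊢; omega
        have hlen_after : after.length ≤ n := by
          subst hsplit; simp at hlen ⊢; omega
        have hbal_inner : pvBalGo inner 0 = true := by
          have := bal_of_pos inner 1 hpos hcnt; simpa using this
        -- take/drop of the split
        have htake : rest.take (1 + inner.length - 1) = inner := by
          subst hsplit; simp
        have hdrop : rest.drop (1 + inner.length) = after := by
          subst hsplit
          have : inner ++ ")" :: after = (inner ++ [")"]) ++ after := by simp
          rw [this, Nat.add_comm 1 inner.length,
            List.drop_left' (by simp)]
        -- unfold stA on the '(' case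
        rw [pvStA]
        simp only [hfmp, htake, hdrop]
        -- unfold B one step, then cross inner with the IH, then the ')' step, then after
        rw [List.cons_append]; simp only [altGo]
        rw [hsplit, List.append_assoc, List.cons_append,
          ih inner hlen_inner hbal_inner _ _ none ""]
        simp only [altGo]
        simp only [if_neg (by decide : (")" : String) ≠ "(")]
        rw [recA_eq_stA]
        exact ih after hlen_after hafter l2 s _ _
      · by_cases hclose : token = ")"
        · exfalso
          subst hclose
          simp only [pvBalGo, Bool.and_eq_true, decide_eq_true_eq] at hbal
          have : pvDelta ")" = -1 := by decide
          omega
        · have hd0 : pvDelta token = 0 := by simp [pvDelta, htok, hclose]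
          simp only [pvBalGo, hd0, add_zero, Bool.and_eq_true, decide_eq_true_eq] at hbal
          obtain ⟨-, hrest⟩ := hbal
          have hlen' : rest.length ≤ n := by simp at hlen; omega
          by_cases hdig : PySem.Str.strIsdigit token = true
          · rw [List.cons_append]; simp only [altGo]
            simp only [htok, hclose, if_false, hdig, if_true]
            rw [pvStA]
            simp only [htok, if_false, hdig, if_true]
            exact ih rest hlen' hrest l2 s _ _
          · rw [List.cons_append]; simp only [altGo]
            simp only [htok, hclose, if_false, hdig]
            rw [pvStA]
            simp only [htok, if_false, hdig]
            exact ih rest hlen' hrest l2 s left token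

-- ===== VERDICT (by name: the statement is the Claim_ definition above) =====
theorem rec_evaluate_spec : Claim_equal_rec_evaluate := by
  intro e _ hpre
  unfold Spec_rec_evaluate rec_evaluate rec_evaluate_alt
  have h := altGo_balanced e.length e (le_refl _) hpre [] [] none ""
  rw [List.append_nil] at h
  rw [h, altGo, recA_eq_stA]
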